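-- pv_equiv track=rewrite | github.com/felixrauh/conference_scheduler | src/matching_pipeline.py | compute_co_preference_weight
-- ===== SOURCE A (Python) =====
-- from typing import Dict, List, Set, Tuple, Optional, FrozenSet
--
-- def compute_co_preference_weight(
--     talk_i: str,
--     talk_j: str,
--     preferences: Dict[str, Set[str]]
-- ) -> int:
--     """
--     Compute co-preference weight between two talks.
--
--     Weight = number of participants who want BOTH talks.
--     """
--     count = 0
--     for p_id, prefs in preferences.items():
--         if talk_i in prefs and talk_j in prefs:
--             count += 1
--     return count
-- ===== SOURCE B (Python) =====
-- def compute_co_preference_weight(talk_i, talk_j, preferences):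
--     s_i = {p for p, prefs in preferences.items() if talk_i in prefs}
--     s_j = {p for p, prefs in preferences.items() if talk_j in prefs}
--     return len(s_i & s_j)
-- ===== Notes on version B (the rewrite author's own statement) =====
-- stated objective: idiomatic
-- what changed: Replaces the fused counting loop with building the two participant-sets S_i and S_j by comprehension and returning the size of their intersection.
import Mathlib
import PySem

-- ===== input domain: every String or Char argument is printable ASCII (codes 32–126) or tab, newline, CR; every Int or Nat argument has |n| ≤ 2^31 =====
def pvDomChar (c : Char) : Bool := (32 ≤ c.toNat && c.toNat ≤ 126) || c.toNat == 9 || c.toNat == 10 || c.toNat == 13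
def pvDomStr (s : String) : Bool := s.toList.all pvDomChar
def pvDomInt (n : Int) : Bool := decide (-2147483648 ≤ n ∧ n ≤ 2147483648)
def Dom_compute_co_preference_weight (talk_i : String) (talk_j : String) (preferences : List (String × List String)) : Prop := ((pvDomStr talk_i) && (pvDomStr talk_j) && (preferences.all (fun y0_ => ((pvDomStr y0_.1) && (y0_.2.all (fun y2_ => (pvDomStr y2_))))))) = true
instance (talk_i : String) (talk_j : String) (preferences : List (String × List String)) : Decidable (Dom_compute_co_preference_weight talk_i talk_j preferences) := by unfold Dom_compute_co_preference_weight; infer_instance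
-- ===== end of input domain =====

-- B builds the two participant-sets and returns the size of their intersection instead of A's fused counting loop (idiomatic; return value only).

-- ===== PORT A =====
-- fused loop: count += 1 when both talks are in the participant's preference set
def compute_co_preference_weight (talk_i : String) (talk_j : String) (preferences : List (String × List String)) : Int :=
  preferences.foldl (fun count pp => if talk_i ∈ pp.2 ∧ talk_j ∈ pp.2 then count + 1 else count) 0

-- ===== PORT B =====
-- s_i / s_j: set comprehensions over preferences.items(); result = len(s_i & s_j)
def compute_co_preference_weight_alt (talk_i : String) (talk_j : String) (preferences : List (String × List String)) : Int :=
  let s_i : PySem.Set String := PySem.Set.ofList ((preferences.filter (fun pp => decide (talk_i ∈ pp.2))).map Prod.fst)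
  let s_j : PySem.Set String := PySem.Set.ofList ((preferences.filter (fun pp => decide (talk_j ∈ pp.2))).map Prod.fst)
  PySem.Set.len (PySem.Set.inter s_i s_j)

-- ===== PRECONDITION & SPEC =====
-- Pre_ requires the participant ids (association-list keys) to be pairwise distinct, which every
-- Python dict satisfies; it excludes no input the Python A accepts (dicts cannot repeat keys).
def Pre_compute_co_preference_weight (talk_i : String) (talk_j : String) (preferences : List (String × List String)) : Prop :=
  (preferences.map Prod.fst).Nodup
instance (talk_i : String) (talk_j : String) (preferences : List (String × List String)) : Decidable (Pre_compute_co_preference_weight talk_i talk_j preferences) := by unfold Pre_compute_co_preference_weight; infer_instance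
def pvWitness_compute_co_preference_weight : String × String × (List (String × List String)) :=
  ("x", "y", [("alice", ["x", "y"]), ("bob", ["x"])])
def Spec_compute_co_preference_weight (talk_i : String) (talk_j : String) (preferences : List (String × List String)) (out : Int) : Prop := out = compute_co_preference_weight_alt talk_i talk_j preferences
instance (talk_i : String) (talk_j : String) (preferences : List (String × List String)) (out : Int) : Decidable (Spec_compute_co_preference_weight talk_i talk_j preferences out) := by unfold Spec_compute_co_preference_weight; infer_instance

-- ===== CLAIM (what is proved, stated in full; the proofs are below) =====
def Claim_equal_compute_co_preference_weight : Prop := ∀ (talk_i : String) (talk_j : String) (preferences : List (String × List String)), Dom_compute_co_preference_weight talk_i talk_j preferences → Pre_compute_co_preference_weight talk_i talk_j preferences → Spec_compute_co_preference_weight talk_i talk_j preferences (compute_co_preference_weight talk_i talk_j preferences)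

-- ===== LEMMAS AND PROOFS =====

-- A's foldl with starting value c is c plus the count of pairs containing both talks.
theorem foldA_eq_countP (ti tj : String) (l : List (String × List String)) (c : Int) :
    l.foldl (fun count pp => if ti ∈ pp.2 ∧ tj ∈ pp.2 then count + 1 else count) c
      = c + (l.countP (fun pp => decide (ti ∈ pp.2) && decide (tj ∈ pp.2)) : Int) := by
  induction l generalizing c with
  | nil => simp
  | cons h t ih =>
    simp only [List.foldl_cons, List.countP_cons, ih]
    by_cases hi : ti ∈ h.2 <;> by_cases hj : tj ∈ h.2 <;> simp [hi, hj] <;> push_cast <;> ring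

-- the filtered key list is a sublist of the keys
theorem filtered_keys_sublist (p : String × List String → Bool) (l : List (String × List String)) :
    ((l.filter p).map Prod.fst).Sublist (l.map Prod.fst) :=
  List.Sublist.map Prod.fst (List.filter_sublist (p := p) (l := l))

-- with distinct keys, |S_i ∩ S_j| = number of pairs whose pref-set contains both talks
theorem inter_len_eq_countP (ti tj : String) (l : List (String × List String))
    (hnd : (l.map Prod.fst).Nodup) :
    (((l.filter (fun pp => decide (ti ∈ pp.2))).map Prod.fst).filter
        (fun k => ((l.filter (fun pp => decide (tj ∈ pp.2))).map Prod.fst).contains k)).length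
      = l.countP (fun pp => decide (ti ∈ pp.2) && decide (tj ∈ pp.2)) := by
  induction l with
  | nil => simp
  | cons h t ih =>
    simp only [List.map_cons, List.nodup_cons] at hnd
    obtain ⟨hk, hndt⟩ := hnd
    have ihv := ih hndt
    have hnotail : h.1 ∉ (t.filter (fun pp => decide (tj ∈ pp.2))).map Prod.fst :=
      fun hm => hk ((filtered_keys_sublist _ t).mem hm)
    have hcong : ((t.filter (fun pp => decide (ti ∈ pp.2))).map Prod.fst).filter
          (fun k => (h.1 :: (t.filter (fun pp => decide (tj ∈ pp.2))).map Prod.fst).contains k)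
        = ((t.filter (fun pp => decide (ti ∈ pp.2))).map Prod.fst).filter
          (fun k => ((t.filter (fun pp => decide (tj ∈ pp.2))).map Prod.fst).contains k) := by
      apply List.filter_congr
      intro x hx
      have hxk : x ≠ h.1 := fun he => hk ((filtered_keys_sublist _ t).mem (he ▸ hx))
      simp [List.contains_cons, hxk]
    by_cases hi : ti ∈ h.2 <;> by_cases hj : tj ∈ h.2 <;>
      simp_all [List.filter_cons, List.countP_cons, List.contains_cons]

-- a duplicate-free list is already a set: ofList is the identity on it
theorem ofList_of_nodup (xs : List String) (h : xs.Nodup) : PySem.Set.ofList xs = xs := by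
  induction xs using List.reverseRecOn with
  | nil => rfl
  | append_singleton ys y ih =>
    rw [List.nodup_append] at h
    simp only [PySem.Set.ofList, List.foldl_append, List.foldl_cons, List.foldl_nil] at *
    rw [ih h.1, PySem.Set.add_of_not_mem]
    exact fun hm => h.2.2 y hm y (List.mem_singleton_self y) rfl

-- ===== VERDICT (by name: the statement is the Claim_ definition above) =====
theorem compute_co_preference_weight_spec : Claim_equal_compute_co_preference_weight := by
  intro ti tj prefs _ hpre
  unfold Spec_compute_co_preference_weight compute_co_preference_weight compute_co_preference_weight_alt
  rw [foldA_eq_countP]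
  have h1 := ofList_of_nodup _ ((filtered_keys_sublist (fun pp => decide (ti ∈ pp.2)) prefs).nodup hpre)
  have h2 := ofList_of_nodup _ ((filtered_keys_sublist (fun pp => decide (tj ∈ pp.2)) prefs).nodup hpre)
  simp only [h1, h2, PySem.Set.len, PySem.Set.inter, PySem.Set.contains_eq_listContains]
  rw [inter_len_eq_countP ti tj prefs hpre]
  ring
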